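-- pv_equiv track=rewrite | github.com/wyk18703232953/myResearch | codeComplex/data copy/filteredData/python/quadratic/python_quadratic_0586.py | generate_input_structure
-- ===== SOURCE A (Python) =====
-- def generate_input_structure(n):
--     if n < 3:
--         n = 3
--     T = n
--     cases = []
--     for t in range(T):
--         length = 3 + (t % 5)
--         k = 1 + (t % length)
--         s_chars = []
--         for i in range(length):
--             # deterministic pattern over 'R', 'G', 'B'
--             v = (t + i) % 3
--             if v == 0:
--                 s_chars.append('R')
--             elif v == 1:
--                 s_chars.append('G')
--
--             else:
--                 s_chars.append('B')
--         s = ''.join(s_chars)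
--         cases.append((length, k, s))
--     return T, cases
-- ===== SOURCE B (Python) =====
-- def generate_input_structure(n):
--     T = n if n >= 3 else 3
--     cases = [(3 + (t % 5),
--               1 + (t % (3 + (t % 5))),
--               'RGBRGBRGB'[t % 3 : t % 3 + 3 + (t % 5)])
--              for t in range(T)]
--     return T, cases
-- ===== Notes on version B (the rewrite author's own statement) =====
-- stated objective: faster
-- what changed: The per-character inner loop with its if/elif/else over (t+i)%3 is replaced by a closed-form slice 'RGBRGBRGB'[t%3 : t%3+length] of the fixed repeated pattern, and the append loop becomes a single comprehension (no per-character Python work).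
import Mathlib
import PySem

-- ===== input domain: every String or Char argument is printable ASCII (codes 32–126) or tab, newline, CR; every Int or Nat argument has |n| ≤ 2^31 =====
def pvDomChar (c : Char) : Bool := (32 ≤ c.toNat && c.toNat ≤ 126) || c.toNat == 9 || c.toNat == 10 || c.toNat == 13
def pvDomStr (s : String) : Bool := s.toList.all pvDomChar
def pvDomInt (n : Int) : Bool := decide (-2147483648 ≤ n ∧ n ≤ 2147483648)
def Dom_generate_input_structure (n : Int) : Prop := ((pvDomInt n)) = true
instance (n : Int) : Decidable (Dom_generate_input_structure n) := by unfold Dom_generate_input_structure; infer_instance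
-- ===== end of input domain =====

-- B replaces A's per-character inner loop and if/elif chain by a closed-form slice of the
-- fixed pattern 'RGBRGBRGB' (position i of the string is 'RGB'[(t+i)%3]); objective: simpler.

-- ===== PORT A =====
def generate_input_structure (n : Int) : Int × (List (Int × Int × String)) :=
  let n := if n < 3 then 3 else n
  let T := n
  let cases := (PySem.List.pyRange 0 T 1).foldl (fun cases t =>
    let length := 3 + PySem.Int.mod t 5
    let k := 1 + PySem.Int.mod t length
    let s_chars := (PySem.List.pyRange 0 length 1).foldl (fun s_chars i =>
      let v := PySem.Int.mod (t + i) 3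
      if v = 0 then s_chars ++ ["R"]
      else if v = 1 then s_chars ++ ["G"]
      else s_chars ++ ["B"]) []
    let s := PySem.Str.join "" s_chars
    cases ++ [(length, k, s)]) []
  (T, cases)

-- ===== PORT B =====
def generate_input_structure_alt (n : Int) : Int × (List (Int × Int × String)) :=
  let T := if n ≥ 3 then n else 3
  (T, (PySem.List.pyRange 0 T 1).map (fun t =>
    (3 + PySem.Int.mod t 5,
     1 + PySem.Int.mod t (3 + PySem.Int.mod t 5),
     PySem.Str.slice "RGBRGBRGB" (some (PySem.Int.mod t 3))
       (some (PySem.Int.mod t 3 + (3 + PySem.Int.mod t 5))))))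

-- ===== PRECONDITION & SPEC =====
def Spec_generate_input_structure (n : Int) (out : Int × (List (Int × Int × String))) : Prop := out = generate_input_structure_alt n
instance (n : Int) (out : Int × (List (Int × Int × String))) : Decidable (Spec_generate_input_structure n out) := by unfold Spec_generate_input_structure; infer_instance

-- ===== CLAIM (what is proved, stated in full; the proofs are below) =====
def Claim_equal_generate_input_structure : Prop := ∀ (n : Int), Dom_generate_input_structure n → Spec_generate_input_structure n (generate_input_structure n)

-- ===== LEMMAS AND PROOFS =====

-- the inner character loop only depends on t through t % 3
lemma foldl_shift (t c L : Int) (h : t % 3 = c) :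
    List.foldl (fun s_chars i =>
      if PySem.Int.mod (t + i) 3 = 0 then s_chars ++ ["R"]
      else if PySem.Int.mod (t + i) 3 = 1 then s_chars ++ ["G"]
      else s_chars ++ ["B"]) [] (PySem.List.pyRange 0 L 1)
  = List.foldl (fun s_chars i =>
      if PySem.Int.mod (c + i) 3 = 0 then s_chars ++ ["R"]
      else if PySem.Int.mod (c + i) 3 = 1 then s_chars ++ ["G"]
      else s_chars ++ ["B"]) [] (PySem.List.pyRange 0 L 1) := by
  apply PySem.List.foldl_congr_mem
  intro acc i _
  have hm : PySem.Int.mod (t + i) 3 = PySem.Int.mod (c + i) 3 := by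
    rw [PySem.Int.mod_eq_emod_of_pos (by norm_num : (0:Int) < 3),
        PySem.Int.mod_eq_emod_of_pos (by norm_num : (0:Int) < 3)]
    omega
  rw [hm]

-- per-case string equality: A's built string equals B's slice of 'RGBRGBRGB'
lemma case_eq (t : Int) :
    PySem.Str.join "" (List.foldl (fun s_chars i =>
      if PySem.Int.mod (t + i) 3 = 0 then s_chars ++ ["R"]
      else if PySem.Int.mod (t + i) 3 = 1 then s_chars ++ ["G"]
      else s_chars ++ ["B"]) [] (PySem.List.pyRange 0 (3 + PySem.Int.mod t 5) 1))
  = PySem.Str.slice "RGBRGBRGB" (some (PySem.Int.mod t 3))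
      (some (PySem.Int.mod t 3 + (3 + PySem.Int.mod t 5))) := by
  have e5 : PySem.Int.mod t 5 = t % 5 :=
    PySem.Int.mod_eq_emod_of_pos (by norm_num : (0:Int) < 5)
  have e3 : PySem.Int.mod t 3 = t % 3 :=
    PySem.Int.mod_eq_emod_of_pos (by norm_num : (0:Int) < 3)
  rw [e5, e3]
  have h5 : t % 5 = 0 ∨ t % 5 = 1 ∨ t % 5 = 2 ∨ t % 5 = 3 ∨ t % 5 = 4 := by omega
  have h3 : t % 3 = 0 ∨ t % 3 = 1 ∨ t % 3 = 2 := by omega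
  rcases h5 with h5 | h5 | h5 | h5 | h5 <;> rcases h3 with h3 | h3 | h3 <;>
    rw [h5, h3, foldl_shift t _ _ h3] <;> decide

-- ===== VERDICT (by name: the statement is the Claim_ definition above) =====
theorem generate_input_structure_spec : Claim_equal_generate_input_structure := by
  intro n _
  unfold Spec_generate_input_structure
  simp only [generate_input_structure, generate_input_structure_alt]
  have hT : (if n < 3 then (3:Int) else n) = (if n ≥ 3 then n else 3) := by
    split_ifs <;> omega
  rw [hT, PySem.List.foldl_append_singleton_eq_map, List.nil_append]
  refine congrArg _ (List.map_congr_left ?_)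
  intro t _
  simp only [Prod.mk.injEq]
  exact ⟨trivial, trivial, case_eq t⟩
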